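-- pv_equiv track=rewrite | github.com/Haoyun-Hong/cs61a-spring-2019 | homework/hw08/hwk08.py | larger_values
-- ===== SOURCE A (Python) =====
-- def larger_values(x, lst):
-- 	if not lst:
-- 		return lst
-- 	elif len(lst)==1 and lst[0] > x:
-- 		return lst
-- 	elif lst [0] > x:
-- 		new_list=[lst[0]]+larger_values(x, lst[1:])
-- 		return new_list
-- 	else:
-- 		return larger_values(x, lst[1:])
-- ===== SOURCE B (Python) =====
-- def larger_values(x, lst):
--     result = []
--     for e in lst:
--         if e > x:
--             result.append(e)
--     return result
-- ===== Notes on version B (the rewrite author's own statement) =====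
-- stated objective: simpler
-- what changed: Replaces A's linear recursion over lst[1:] (with a special single-element branch) by a single iterative pass over lst with an accumulator list.
import Mathlib
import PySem

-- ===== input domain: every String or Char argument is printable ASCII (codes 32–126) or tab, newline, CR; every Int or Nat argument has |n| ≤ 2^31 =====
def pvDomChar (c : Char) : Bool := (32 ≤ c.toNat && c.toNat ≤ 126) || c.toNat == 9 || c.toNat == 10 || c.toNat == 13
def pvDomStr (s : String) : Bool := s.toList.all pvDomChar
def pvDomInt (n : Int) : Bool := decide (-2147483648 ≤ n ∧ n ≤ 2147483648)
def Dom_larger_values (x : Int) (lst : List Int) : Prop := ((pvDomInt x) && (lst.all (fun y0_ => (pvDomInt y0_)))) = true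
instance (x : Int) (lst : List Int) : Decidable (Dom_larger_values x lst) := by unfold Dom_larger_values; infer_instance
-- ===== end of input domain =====

-- B replaces A's linear recursion (with its redundant single-element branch) by one iterative
-- accumulator pass; objective: simpler.

-- ===== PORT A =====
-- literal transliteration of A's recursion, branch for branch
def larger_values (x : Int) (lst : List Int) : List Int :=
  if lst = [] then lst
  else if lst.length = 1 ∧ lst.headI > x then lst
  else if lst.headI > x then [lst.headI] ++ larger_values x lst.tail
  else larger_values x lst.tail
termination_by lst.length
decreasing_by
  all_goals
    cases lst with
    | nil => simp_all
    | cons a t => simp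

-- ===== PORT B =====
-- iterative loop: result starts empty, append e when e > x
def larger_values_alt (x : Int) (lst : List Int) : List Int :=
  lst.foldl (fun result e => if e > x then result ++ [e] else result) []

-- ===== PRECONDITION & SPEC =====
def Spec_larger_values (x : Int) (lst : List Int) (out : List Int) : Prop := out = larger_values_alt x lst
instance (x : Int) (lst : List Int) (out : List Int) : Decidable (Spec_larger_values x lst out) := by unfold Spec_larger_values; infer_instance

-- ===== CLAIM (what is proved, stated in full; the proofs are below) =====
def Claim_equal_larger_values : Prop := ∀ (x : Int) (lst : List Int), Dom_larger_values x lst → Spec_larger_values x lst (larger_values x lst)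

-- ===== LEMMAS AND PROOFS =====

theorem lv_alt_foldl_acc (x : Int) (lst : List Int) (acc : List Int) :
    lst.foldl (fun result e => if e > x then result ++ [e] else result) acc
      = acc ++ lst.foldl (fun result e => if e > x then result ++ [e] else result) [] := by
  induction lst generalizing acc with
  | nil => simp
  | cons a t ih =>
    simp only [List.foldl]
    rw [ih, ih (if a > x then [] ++ [a] else [])]
    split <;> simp

theorem lv_alt_cons (x a : Int) (t : List Int) :
    larger_values_alt x (a :: t)
      = (if a > x then [a] else []) ++ larger_values_alt x t := by
  simp only [larger_values_alt, List.foldl]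
  rw [lv_alt_foldl_acc]
  split <;> simp

theorem lv_eq (x : Int) (lst : List Int) : larger_values x lst = larger_values_alt x lst := by
  induction lst with
  | nil => simp [larger_values, larger_values_alt]
  | cons a t ih =>
    rcases t with _ | ⟨b, t2⟩
    · by_cases h : a > x <;>
        simp [larger_values, lv_alt_cons, larger_values_alt, h]
    · rw [larger_values, lv_alt_cons]
      have hno : ¬((a :: b :: t2).length = 1 ∧ (a :: b :: t2).headI > x) := by simp
      by_cases h : a > x <;> simp [hno, h, ih]

-- ===== VERDICT (by name: the statement is the Claim_ definition above) =====
theorem larger_values_spec : Claim_equal_larger_values := by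
  intro x lst _
  unfold Spec_larger_values
  exact lv_eq x lst
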